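-- pv_equiv track=rewrite | github.com/zed0/advent-of-code | 2024/src/aoc-18/main.py | grid_to_string
-- ===== SOURCE A (Python) =====
-- def grid_to_string(positions, size):
--     grid = list(positions)
--     string = ""
--     for y in range(size[1]):
--         for x in range(size[0]):
--             string += "#" if (x, y) in grid else "."
--
--         string += "\n"
--     return string
-- ===== SOURCE B (Python) =====
-- def grid_to_string(positions, size):
--     w, h = size[0], size[1]
--     grid = [["."] * w for _ in range(h)]
--     for x, y in positions:
--         if 0 <= x < w and 0 <= y < h:
--             grid[y][x] = "#"
--     return "".join("".join(row) + "\n" for row in grid)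
-- ===== Notes on version B (the rewrite author's own statement) =====
-- stated objective: faster
-- what changed: Instead of membership-testing every grid cell against the positions list, B allocates a 2D grid of '.', stamps '#' once per in-range position, and joins the rows.
import Mathlib
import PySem

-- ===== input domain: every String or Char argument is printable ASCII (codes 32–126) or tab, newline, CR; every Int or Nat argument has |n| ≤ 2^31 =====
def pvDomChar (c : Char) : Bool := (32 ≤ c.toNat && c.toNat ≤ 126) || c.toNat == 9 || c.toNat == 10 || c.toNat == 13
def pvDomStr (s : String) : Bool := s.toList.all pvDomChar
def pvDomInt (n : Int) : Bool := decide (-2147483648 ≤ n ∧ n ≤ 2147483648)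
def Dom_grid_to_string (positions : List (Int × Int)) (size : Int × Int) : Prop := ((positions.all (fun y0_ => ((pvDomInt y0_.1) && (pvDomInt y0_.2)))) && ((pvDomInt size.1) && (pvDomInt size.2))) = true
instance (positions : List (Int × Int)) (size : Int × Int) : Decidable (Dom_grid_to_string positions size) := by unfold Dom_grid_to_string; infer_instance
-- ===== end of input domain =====

-- B replaces A's per-cell membership scan of `positions` by a 2D grid of '.' that is
-- stamped '#' once per in-range position and then joined row by row (faster: O(W*H+P) vs O(W*H*P)).

-- ===== PORT A =====
-- strings are carried as List Char (String.ofList at the end); each `+=` is a `++` on the list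
-- `grid = list(positions)` is a fresh copy of the same list; membership is tested on it directly
def grid_to_string (positions : List (Int × Int)) (size : Int × Int) : String :=
  String.ofList ((PySem.List.pyRange 0 size.2 1).foldl (fun string y =>
    ((PySem.List.pyRange 0 size.1 1).foldl (fun s x =>
      s ++ (if (x, y) ∈ positions then ['#'] else ['.'])) string) ++ ['\n']) [])

-- ===== PORT B =====
-- one stamping step of B's loop body: bounds test, then grid[y][x] = '#'
def gridStamp (w h : Int) (g : List (List Char)) (p : Int × Int) : List (List Char) :=
  if 0 ≤ p.1 ∧ p.1 < w ∧ 0 ≤ p.2 ∧ p.2 < h then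
    g.set p.2.toNat ((g.getD p.2.toNat []).set p.1.toNat '#')
  else g

def grid_to_string_alt (positions : List (Int × Int)) (size : Int × Int) : String :=
  let grid := positions.foldl (gridStamp size.1 size.2)
    (List.replicate size.2.toNat (List.replicate size.1.toNat '.'))
  String.ofList ((grid.map (fun row => row ++ ['\n'])).flatten)

-- ===== PRECONDITION & SPEC =====
def Spec_grid_to_string (positions : List (Int × Int)) (size : Int × Int) (out : String) : Prop := out = grid_to_string_alt positions size
instance (positions : List (Int × Int)) (size : Int × Int) (out : String) : Decidable (Spec_grid_to_string positions size out) := by unfold Spec_grid_to_string; infer_instance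

-- ===== CLAIM (what is proved, stated in full; the proofs are below) =====
def Claim_equal_grid_to_string : Prop := ∀ (positions : List (Int × Int)) (size : Int × Int), Dom_grid_to_string positions size → Spec_grid_to_string positions size (grid_to_string positions size)

-- ===== LEMMAS AND PROOFS =====

-- the common normal form both ports are reduced to
def pvCell (positions : List (Int × Int)) (x y : Int) : Char :=
  if (x, y) ∈ positions then '#' else '.'

def pvGrid (positions : List (Int × Int)) (w h : Int) : List (List Char) :=
  (List.range h.toNat).map (fun (ys : Nat) =>
    (List.range w.toNat).map (fun (xs : Nat) => pvCell positions (xs : Int) (ys : Int)))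

lemma set_map_range {α : Type} (n : Nat) (f : Nat → α) (k : Nat) (a : α) :
    ((List.range n).map f).set k a = (List.range n).map (fun i => if i = k then a else f i) := by
  apply List.ext_getElem
  · simp
  · intro i h1 h2
    simp only [List.getElem_set, List.getElem_map, List.getElem_range]
    by_cases hik : i = k
    · subst hik
      simp
    · rw [if_neg (fun hh => hik hh.symm), if_neg hik]

lemma stamp_map (w h : Int) (f : Nat → Nat → Char) (p : Int × Int) :
    gridStamp w h ((List.range h.toNat).map (fun (ys : Nat) => (List.range w.toNat).map (f ys))) p
      = (List.range h.toNat).map (fun (ys : Nat) => (List.range w.toNat).map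
          (fun (xs : Nat) => if p = ((xs : Int), (ys : Int)) then '#' else f ys xs)) := by
  unfold gridStamp
  split_ifs with hb
  · obtain ⟨h1, h2, h3, h4⟩ := hb
    have hlt : p.2.toNat < ((List.range h.toNat).map
        (fun (ys : Nat) => (List.range w.toNat).map (f ys))).length := by
      simp
      omega
    rw [List.getD_eq_getElem _ _ hlt]
    simp only [List.getElem_map, List.getElem_range]
    rw [set_map_range, set_map_range]
    apply List.map_congr_left
    intro ys hys
    simp only [List.mem_range] at hys
    have hiff : ∀ xs : Nat, p = ((xs : Int), (ys : Int)) ↔ (xs = p.1.toNat ∧ ys = p.2.toNat) := by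
      intro xs
      rw [Prod.ext_iff]
      omega
    by_cases hy : ys = p.2.toNat
    · rw [if_pos hy]
      apply List.map_congr_left
      intro xs hxs
      by_cases hx : xs = p.1.toNat
      · rw [if_pos hx, if_pos ((hiff xs).mpr ⟨hx, hy⟩)]
      · rw [if_neg hx, if_neg (fun hc => hx ((hiff xs).mp hc).1), hy]
    · rw [if_neg hy]
      apply List.map_congr_left
      intro xs hxs
      rw [if_neg (fun hc => hy ((hiff xs).mp hc).2)]
  · apply List.map_congr_left
    intro ys hys
    simp only [List.mem_range] at hys
    apply List.map_congr_left
    intro xs hxs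
    simp only [List.mem_range] at hxs
    have hpe : ¬ p = ((xs : Int), (ys : Int)) := by
      intro hc
      rw [Prod.ext_iff] at hc
      omega
    rw [if_neg hpe]

lemma foldl_stamp (w h : Int) (ps : List (Int × Int)) (f : Nat → Nat → Char) :
    ps.foldl (gridStamp w h) ((List.range h.toNat).map (fun (ys : Nat) => (List.range w.toNat).map (f ys)))
      = (List.range h.toNat).map (fun (ys : Nat) => (List.range w.toNat).map
          (fun (xs : Nat) => if ((xs : Int), (ys : Int)) ∈ ps then '#' else f ys xs)) := by
  induction ps generalizing f with
  | nil => simp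
  | cons p ps ih =>
    rw [List.foldl_cons, stamp_map, ih]
    apply List.map_congr_left
    intro ys _
    apply List.map_congr_left
    intro xs _
    by_cases hmem : ((xs : Int), (ys : Int)) ∈ ps
    · simp [hmem]
    · by_cases hp : p = ((xs : Int), (ys : Int)) <;> simp [hmem, hp, eq_comm]

lemma alt_eq (positions : List (Int × Int)) (size : Int × Int) :
    grid_to_string_alt positions size
      = String.ofList (((pvGrid positions size.1 size.2).map (fun row => row ++ ['\n'])).flatten) := by
  show String.ofList (((positions.foldl (gridStamp size.1 size.2)
      (List.replicate size.2.toNat (List.replicate size.1.toNat '.'))).map (fun row => row ++ ['\n'])).flatten) = _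
  have hinit : List.replicate size.2.toNat (List.replicate size.1.toNat '.')
      = (List.range size.2.toNat).map (fun (_ : Nat) => (List.range size.1.toNat).map (fun (_ : Nat) => '.')) := by
    simp [List.map_const']
  rw [hinit, foldl_stamp]
  rfl

lemma inner_loop (positions : List (Int × Int)) (w : Int) (y : Int) (s : List Char) :
    (PySem.List.pyRange 0 w 1).foldl (fun s x =>
        s ++ (if (x, y) ∈ positions then ['#'] else ['.'])) s
      = s ++ (List.range w.toNat).map (fun (xs : Nat) => pvCell positions (xs : Int) y) := by
  have hbody : (PySem.List.pyRange 0 w 1).foldl (fun s x =>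
        s ++ (if (x, y) ∈ positions then ['#'] else ['.'])) s
      = (PySem.List.pyRange 0 w 1).foldl (fun s x => s ++ [pvCell positions x y]) s := by
    apply PySem.List.foldl_congr_mem
    intro acc x _
    simp [pvCell, apply_ite (fun c => [c])]
  rw [hbody, PySem.List.pyRange_one, List.foldl_map,
      PySem.List.foldl_append_singleton_eq_map]
  simp

lemma a_eq (positions : List (Int × Int)) (size : Int × Int) :
    grid_to_string positions size
      = String.ofList (((pvGrid positions size.1 size.2).map (fun row => row ++ ['\n'])).flatten) := by
  unfold grid_to_string
  congr 1
  have hbody : (PySem.List.pyRange 0 size.2 1).foldl (fun string y =>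
        ((PySem.List.pyRange 0 size.1 1).foldl (fun s x =>
          s ++ (if (x, y) ∈ positions then ['#'] else ['.'])) string) ++ ['\n']) []
      = (PySem.List.pyRange 0 size.2 1).foldl (fun string y =>
          string ++ ((List.range size.1.toNat).map (fun (xs : Nat) => pvCell positions (xs : Int) y) ++ ['\n'])) [] := by
    apply PySem.List.foldl_congr_mem
    intro acc y _
    rw [inner_loop, List.append_assoc]
  rw [hbody, PySem.List.foldl_append_eq_flatMap, PySem.List.pyRange_one]
  simp only [List.flatMap_def, List.map_map, pvGrid, List.nil_append]
  rw [sub_zero]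
  congr 1
  apply List.map_congr_left
  intro k _
  simp [Function.comp]

-- ===== VERDICT (by name: the statement is the Claim_ definition above) =====
theorem grid_to_string_spec : Claim_equal_grid_to_string := by
  intro positions size _
  unfold Spec_grid_to_string
  rw [a_eq, alt_eq]
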